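-- pv_equiv track=rewrite | github.com/SadyRifat/Road-Accident-Analysis | feature_selection.py | findCommonFeature
-- ===== SOURCE A (Python) =====
-- def findCommonFeature(featureLIST):
--     featureSET = []
--     for item in featureLIST:
--         featureSET.append(set(item))
--
--     setItem = featureSET.pop()
--     for item in featureSET:
--         setItem = setItem.intersection(item)
--
--     return setItem
-- ===== SOURCE B (Python) =====
-- def findCommonFeature(featureLIST):
--     n = len(featureLIST)
--     counts = {}
--     for item in featureLIST:
--         for f in set(item):
--             counts[f] = counts.get(f, 0) + 1
--     return {f for f in featureLIST[-1] if counts[f] == n}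
-- ===== Notes on version B (the rewrite author's own statement) =====
-- stated objective: alternative
-- what changed: Replaces the iterated pairwise set intersections with one counting pass (a dict of per-list presence counts) followed by a single filter of the last list's elements keeping those counted in all n lists.
import Mathlib
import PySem

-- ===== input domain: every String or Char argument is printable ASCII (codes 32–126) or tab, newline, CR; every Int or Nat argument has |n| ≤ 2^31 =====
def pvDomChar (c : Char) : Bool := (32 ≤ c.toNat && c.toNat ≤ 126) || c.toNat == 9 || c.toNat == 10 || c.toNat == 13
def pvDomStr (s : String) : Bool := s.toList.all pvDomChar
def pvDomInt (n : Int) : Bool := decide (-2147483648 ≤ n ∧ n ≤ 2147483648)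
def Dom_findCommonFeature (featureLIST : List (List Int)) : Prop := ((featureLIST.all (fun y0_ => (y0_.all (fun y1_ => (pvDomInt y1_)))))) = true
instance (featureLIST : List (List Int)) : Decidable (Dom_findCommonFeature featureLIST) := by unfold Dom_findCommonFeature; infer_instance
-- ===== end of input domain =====

-- B replaces A's iterated pairwise set intersections by one counting pass plus a filter
-- of the last list's elements; equal result on every nonempty input (both raise on []).

-- ===== PORT A =====
-- featureSET = []; for item in featureLIST: featureSET.append(set(item))
-- setItem = featureSET.pop(); for item in featureSET: setItem = setItem.intersection(item)
def findCommonFeature (featureLIST : List (List Int)) : List Int :=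
  let featureSET := featureLIST.foldl (fun acc item => acc ++ [PySem.Set.ofList item]) []
  match PySem.List.pop? featureSET with
  | none => []        -- IndexError on pop() from an empty list; excluded by Pre_
  | some (setItem, rest) => rest.foldl (fun s item => PySem.Set.inter s item) setItem

-- ===== PORT B =====
-- n = len(L); counts[f] += 1 for each f in set(item), each item; then
-- {f for f in L[-1] if counts[f] == n}
def findCommonFeature_alt (featureLIST : List (List Int)) : List Int :=
  let n : Int := featureLIST.length
  let counts : PySem.Dict Int Int :=
    featureLIST.foldl
      (fun d item => (PySem.Set.ofList item).foldl (fun d f => d.insert f (d.getD f 0 + 1)) d)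
      PySem.Dict.empty
  match PySem.List.pyGet? featureLIST (-1) with
  | none => []        -- IndexError on featureLIST[-1]; excluded by Pre_
  | some base => PySem.Set.ofList (base.filter (fun f => counts.getD f 0 == n))

-- ===== PRECONDITION & SPEC =====
-- Pre_ excludes only the empty list, on which A raises IndexError (featureSET.pop()).
def Pre_findCommonFeature (featureLIST : List (List Int)) : Prop := featureLIST ≠ []
instance (featureLIST : List (List Int)) : Decidable (Pre_findCommonFeature featureLIST) := by unfold Pre_findCommonFeature; infer_instance
def pvWitness_findCommonFeature : List (List Int) := [[1, 2, 3], [2, 3, 4], [3, 2]]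

def Spec_findCommonFeature (featureLIST : List (List Int)) (out : List Int) : Prop := out = findCommonFeature_alt featureLIST
instance (featureLIST : List (List Int)) (out : List Int) : Decidable (Spec_findCommonFeature featureLIST out) := by unfold Spec_findCommonFeature; infer_instance

-- ===== CLAIM (what is proved, stated in full; the proofs are below) =====
def Claim_equal_findCommonFeature : Prop := ∀ (featureLIST : List (List Int)), Dom_findCommonFeature featureLIST → Pre_findCommonFeature featureLIST → Spec_findCommonFeature featureLIST (findCommonFeature featureLIST)

-- ===== LEMMAS AND PROOFS =====

-- A's intersection loop: filtering the base set by membership in every later set.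
theorem foldl_inter_eq_filter (ts : List (PySem.Set Int)) (s : PySem.Set Int) :
    ts.foldl (fun s item => PySem.Set.inter s item) s
      = s.filter (fun x => ts.all (fun t => t.contains x)) := by
  induction ts generalizing s with
  | nil => simp
  | cons t ts ih =>
      rw [List.foldl_cons]
      show List.foldl (fun s item => PySem.Set.inter s item) (PySem.Set.inter s t) ts = _
      rw [ih]
      simp only [PySem.Set.inter, List.filter_filter, List.all_cons, Bool.and_comm]

-- filter commutes with Set.add, hence with Set.ofList.
theorem filter_add (p : Int → Bool) (s : PySem.Set Int) (x : Int) :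
    (PySem.Set.add s x).filter p
      = if p x then PySem.Set.add (s.filter p) x else s.filter p := by
  rw [PySem.Set.add_eq_ite, PySem.Set.add_eq_ite]
  by_cases hx : x ∈ s <;> by_cases hp : p x <;>
    simp [hx, hp, List.filter_append, List.mem_filter]

theorem filter_foldl_add (p : Int → Bool) (l : List Int) (s : PySem.Set Int) :
    (l.foldl PySem.Set.add s).filter p
      = (l.filter p).foldl PySem.Set.add (s.filter p) := by
  induction l generalizing s with
  | nil => rfl
  | cons x l ih =>
      by_cases hp : p x <;>
        simp [List.foldl_cons, ih, filter_add, hp]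

theorem filter_ofList (p : Int → Bool) (l : List Int) :
    (PySem.Set.ofList l).filter p = PySem.Set.ofList (l.filter p) := by
  rw [PySem.Set.ofList_eq_foldl, PySem.Set.ofList_eq_foldl, filter_foldl_add]
  rfl

-- B's counting pass: the count at f is the number of input lists containing f.
theorem counts_getD (L : List (List Int)) (d : PySem.Dict Int Int) (f : Int) :
    (L.foldl
      (fun d item => (PySem.Set.ofList item).foldl (fun d x => d.insert x (d.getD x 0 + 1)) d)
      d).getD f 0
      = d.getD f 0 + (L.countP (fun item => decide (f ∈ item)) : Int) := by
  induction L generalizing d with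
  | nil => simp
  | cons item L ih =>
      rw [List.foldl_cons, ih, PySem.Dict.getD_foldl_insert_add_one]
      by_cases hf : f ∈ item
      · rw [List.countP_cons,
          List.count_eq_one_of_mem (PySem.Set.nodup_ofList item) ((PySem.Set.mem_ofList item f).2 hf)]
        simp [hf]
        ring
      · rw [List.countP_cons,
          List.count_eq_zero_of_not_mem (fun h => hf ((PySem.Set.mem_ofList item f).1 h))]
        simp [hf]

theorem pyGet?_neg_one_concat (init : List (List Int)) (last : List Int) :
    PySem.List.pyGet? (init ++ [last]) (-1) = some last := by
  simp [PySem.List.pyGet?, PySem.List.pyIdx?]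

-- ===== VERDICT (by name: the statement is the Claim_ definition above) =====
theorem findCommonFeature_spec : Claim_equal_findCommonFeature := by
  intro L _hdom hpre
  obtain rfl | ⟨init, last, rfl⟩ := List.eq_nil_or_concat' L
  · exact absurd rfl hpre
  simp only [Spec_findCommonFeature, findCommonFeature, findCommonFeature_alt,
    PySem.List.foldl_append_singleton_eq_map, List.nil_append, List.map_append,
    List.map_singleton, PySem.List.pop?_last, pyGet?_neg_one_concat]
  rw [foldl_inter_eq_filter, filter_ofList]
  apply congrArg
  apply List.filter_congr
  intro x hxl
  rw [counts_getD]
  simp only [PySem.Dict.getD_empty, List.countP_append, List.countP_cons, List.countP_nil,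
    List.length_append, List.length_cons, List.length_nil, List.all_map, hxl, zero_add]
  rw [Bool.eq_iff_iff]
  constructor
  · intro h
    have hall : ∀ item ∈ init, x ∈ item := by
      intro item hitem
      have := List.all_eq_true.1 h (item) hitem
      exact (PySem.Set.mem_ofList item x).1 ((List.contains_iff_mem).1 (by simpa using this))
    have : init.countP (fun item => decide (x ∈ item)) = init.length :=
      (List.countP_eq_length).2 (fun a ha => by simp [hall a ha])
    simp [this]
  · intro h
    have hall : ∀ a ∈ init, x ∈ a := by simpa using h
    apply List.all_eq_true.2
    intro t ht
    simpa [PySem.Set.contains] using (PySem.Set.mem_ofList t x).2 (hall t ht)
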